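-- pv_equiv track=rewrite | github.com/comchobo/text_to_triplet | util/set_labeled_dataset.py | put_till_n
-- ===== SOURCE A (Python) =====
-- def put_till_n(text_list, n):
--     temp = text_list[0]
--     if len(text_list)==1 : return temp
--     for text in text_list[1:]:
--         if len(temp)<n:
--             temp+=text
--         else:
--             return temp
--     return temp
-- ===== SOURCE B (Python) =====
-- def put_till_n(text_list, n):
--     # Build the prefix-length table once, count how many proper prefixes are
--     # still shorter than n, and slice + join once.
--     prefix = []
--     total = 0
--     for t in text_list:
--         total += len(t)
--         prefix.append(total)
--     cnt = 0
--     for p in prefix[:-1]: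
--         if p < n:
--             cnt += 1
--     cut = 1 + cnt
--     return ''.join(text_list[:cut])
-- ===== Notes on version B (the rewrite author's own statement) =====
-- stated objective: alternative
-- what changed: Replaces A's fused grow-and-check loop (concatenate each element, re-check the accumulated length, early return) with a prefix-length table built once, a count of prefixes still shorter than n to pick the cutoff, and a single slice + join.
-- outside the precondition, e.g. on put_till_n([], 0): A raises IndexError, B returns ''
import Mathlib
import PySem

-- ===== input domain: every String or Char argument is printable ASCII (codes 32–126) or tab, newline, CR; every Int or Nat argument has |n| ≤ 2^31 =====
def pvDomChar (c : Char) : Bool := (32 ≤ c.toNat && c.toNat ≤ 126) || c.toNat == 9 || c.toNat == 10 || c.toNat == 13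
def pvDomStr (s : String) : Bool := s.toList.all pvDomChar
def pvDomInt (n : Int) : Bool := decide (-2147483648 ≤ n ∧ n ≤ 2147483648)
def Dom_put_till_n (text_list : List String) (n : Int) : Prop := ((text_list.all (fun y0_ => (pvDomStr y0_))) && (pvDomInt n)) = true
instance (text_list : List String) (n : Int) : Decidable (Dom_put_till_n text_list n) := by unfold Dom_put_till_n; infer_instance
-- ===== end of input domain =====

-- B replaces A's fused grow-and-check loop by a prefix-length table, a count of
-- short prefixes, and a single slice + join (objective: alternative decomposition).

-- ===== PORT A =====
-- A's 'for text in text_list[1:]' loop; temp is carried as its character list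
-- ((temp.length : Int) is exactly Python's len(temp), per PySem.Str.len_eq).
def put_till_n_loop (n : Int) (temp : List Char) : List String → List Char
  | [] => temp
  | text :: rest =>
    if (temp.length : Int) < n then put_till_n_loop n (temp ++ text.toList) rest
    else temp

def put_till_n (text_list : List String) (n : Int) : String :=
  match PySem.List.pyGet? text_list 0 with
  | none => ""  -- IndexError on the empty list; excluded by Pre_put_till_n
  | some temp =>
    if text_list.length = 1 then temp
    else String.ofList (put_till_n_loop n temp.toList (PySem.List.slice text_list (some 1) none))

-- ===== PORT B =====
def put_till_n_alt (text_list : List String) (n : Int) : String :=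
  let pre := (text_list.foldl
      (fun (acc : List Int × Int) t =>
        (acc.1 ++ [acc.2 + PySem.Str.len t], acc.2 + PySem.Str.len t))
      (([] : List Int), (0 : Int))).1
  let cnt := (PySem.List.slice pre none (some (-1))).foldl
      (fun (c : Int) p => if p < n then c + 1 else c) 0
  let cut := 1 + cnt
  PySem.Str.join "" (PySem.List.slice text_list none (some cut))

-- ===== PRECONDITION & SPEC =====
-- On the empty list A raises IndexError (text_list[0]); excluded here.
def Pre_put_till_n (text_list : List String) (n : Int) : Prop := text_list ≠ []
instance (text_list : List String) (n : Int) : Decidable (Pre_put_till_n text_list n) := by unfold Pre_put_till_n; infer_instance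
def pvWitness_put_till_n : List String × Int := (["ab", "c"], 2)

def Spec_put_till_n (text_list : List String) (n : Int) (out : String) : Prop := out = put_till_n_alt text_list n
instance (text_list : List String) (n : Int) (out : String) : Decidable (Spec_put_till_n text_list n out) := by unfold Spec_put_till_n; infer_instance

-- ===== CLAIM (what is proved, stated in full; the proofs are below) =====
def Claim_equal_put_till_n : Prop := ∀ (text_list : List String) (n : Int), Dom_put_till_n text_list n → Pre_put_till_n text_list n → Spec_put_till_n text_list n (put_till_n text_list n)

-- ===== LEMMAS AND PROOFS =====

-- prefix sums starting from c (what B's first loop builds)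
def pvPrefix (c : Int) : List String → List Int
  | [] => []
  | t :: ts => (c + PySem.Str.len t) :: pvPrefix (c + PySem.Str.len t) ts

-- the length of temp seen before each element of the rest-list
def pvBases (c : Int) : List String → List Int
  | [] => []
  | t :: ts => c :: pvBases (c + PySem.Str.len t) ts

-- how many elements A's loop absorbs, starting with length c
def pvTake (n c : Int) : List String → Nat
  | [] => 0
  | t :: ts => if c < n then pvTake n (c + PySem.Str.len t) ts + 1 else 0

theorem pv_str_ext (s t : String) (h : s.toList = t.toList) : s = t := by
  have h1 : String.ofList s.toList = s := String.ofList_toList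
  have h2 : String.ofList t.toList = t := String.ofList_toList
  rw [← h1, h, h2]

theorem pv_len_nonneg (t : String) : 0 ≤ PySem.Str.len t := by
  rw [PySem.Str.len_eq]; exact Int.natCast_nonneg _

theorem pv_foldl_prefix (ts : List String) : ∀ (acc : List Int) (c : Int),
    (List.foldl
      (fun (acc : List Int × Int) t =>
        (acc.1 ++ [acc.2 + PySem.Str.len t], acc.2 + PySem.Str.len t))
      (acc, c) ts).1 = acc ++ pvPrefix c ts := by
  induction ts with
  | nil => intro acc c; simp [pvPrefix]
  | cons t ts ih =>
    intro acc c
    rw [List.foldl_cons]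
    have := ih (acc ++ [c + PySem.Str.len t]) (c + PySem.Str.len t)
    simpa [pvPrefix] using this

theorem pv_dropLast_prefix (ts : List String) : ∀ (c : Int) (t : String),
    (pvPrefix c (t :: ts)).dropLast = pvBases (c + PySem.Str.len t) ts := by
  induction ts with
  | nil => intro c t; simp [pvPrefix, pvBases]
  | cons t1 ts ih =>
    intro c t
    show ((c + PySem.Str.len t) :: pvPrefix (c + PySem.Str.len t) (t1 :: ts)).dropLast = _
    rw [List.dropLast_cons_of_ne_nil (by simp [pvPrefix])]
    simp [pvBases, ih]

theorem pv_count_ge (n : Int) (ts : List String) : ∀ (c a : Int), n ≤ c →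
    (pvBases c ts).foldl (fun (c' : Int) p => if p < n then c' + 1 else c') a = a := by
  induction ts with
  | nil => intro c a _; rfl
  | cons t ts ih =>
    intro c a h
    show ((c :: pvBases (c + PySem.Str.len t) ts).foldl _ a) = a
    rw [List.foldl_cons, if_neg (by omega)]
    exact ih _ a (le_trans h (by have := pv_len_nonneg t; omega))

theorem pv_count_bases (n : Int) (ts : List String) : ∀ (c a : Int),
    (pvBases c ts).foldl (fun (c' : Int) p => if p < n then c' + 1 else c') a
      = a + (pvTake n c ts : Int) := by
  induction ts with
  | nil => intro c a; simp [pvBases, pvTake]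
  | cons t ts ih =>
    intro c a
    show ((c :: pvBases (c + PySem.Str.len t) ts).foldl _ a) = _
    rw [List.foldl_cons]
    by_cases h : c < n
    · rw [if_pos h, ih]
      simp [pvTake, if_pos h]
      ring
    · rw [if_neg h, pv_count_ge n ts _ a (by have := pv_len_nonneg t; omega)]
      simp [pvTake, if_neg h]

theorem pv_loop_eq (n : Int) (rest : List String) : ∀ (temp : List Char),
    put_till_n_loop n temp rest
      = temp ++ ((rest.take (pvTake n (temp.length : Int) rest)).map String.toList).flatten := by
  induction rest with
  | nil => intro temp; simp [put_till_n_loop, pvTake]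
  | cons t ts ih =>
    intro temp
    show (if (temp.length : Int) < n then put_till_n_loop n (temp ++ t.toList) ts else temp) = _
    by_cases h : (temp.length : Int) < n
    · rw [if_pos h, ih]
      have hl : ((temp ++ t.toList).length : Int) = (temp.length : Int) + PySem.Str.len t := by
        rw [PySem.Str.len_eq]; simp
      simp only [pvTake, if_pos h, hl]
      simp [List.take_succ_cons]
    · rw [if_neg h]
      simp only [pvTake, if_neg h]
      simp

theorem pv_join_flatten (parts : List String) :
    (PySem.Str.join "" parts).toList = (parts.map String.toList).flatten := by
  rw [PySem.Str.toList_join]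
  show ([].intercalate _) = _
  simp only [List.intercalate]
  induction (parts.map String.toList) with
  | nil => rfl
  | cons a l ih => cases l <;> simp_all [List.intersperse]

-- ===== VERDICT (by name: the statement is the Claim_ definition above) =====
theorem put_till_n_spec : Claim_equal_put_till_n := by
  intro text_list n _ hpre
  unfold Spec_put_till_n
  cases text_list with
  | nil => exact absurd rfl hpre
  | cons t0 ts =>
    have hget : PySem.List.pyGet? (t0 :: ts) (0 : Int) = some t0 := by
      simp [PySem.List.pyGet?, PySem.List.pyIdx?]
    have hpre1 : (((t0 :: ts).foldl
        (fun (acc : List Int × Int) t =>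
          (acc.1 ++ [acc.2 + PySem.Str.len t], acc.2 + PySem.Str.len t))
        (([] : List Int), (0 : Int))).1) = pvPrefix 0 (t0 :: ts) := by
      simpa using pv_foldl_prefix (t0 :: ts) [] 0
    have hcnt : ((PySem.List.slice (pvPrefix 0 (t0 :: ts)) none (some (-1))).foldl
        (fun (c : Int) p => if p < n then c + 1 else c) 0)
          = (pvTake n (PySem.Str.len t0) ts : Int) := by
      rw [PySem.List.slice_to_neg_one, pv_dropLast_prefix ts 0 t0]
      have := pv_count_bases n ts (0 + PySem.Str.len t0) 0
      simpa using this
    have hcut : ∀ (k : Nat), PySem.List.slice (t0 :: ts) none (some ((1 : Int) + (k : Int)))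
        = t0 :: ts.take k := by
      intro k
      rw [PySem.List.slice_to (t0 :: ts) (by omega : (0:Int) ≤ 1 + (k : Int))]
      have : ((1 : Int) + (k : Int)).toNat = k + 1 := by omega
      rw [this]
      simp [List.take_succ_cons]
    unfold put_till_n put_till_n_alt
    rw [hget]
    simp only [hpre1, hcnt, hcut]
    by_cases hone : (t0 :: ts).length = 1
    · have hts : ts = [] := by cases ts with | nil => rfl | cons a b => simp at hone
      subst hts
      rw [if_pos hone]
      apply pv_str_ext
      rw [pv_join_flatten]
      simp [pvTake]
    · rw [if_neg hone]
      apply pv_str_ext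
      rw [pv_join_flatten, PySem.List.slice_from_one, List.tail_cons, String.toList_ofList, pv_loop_eq]
      have : ((t0.toList.length : Nat) : Int) = PySem.Str.len t0 := by
        rw [PySem.Str.len_eq]
      rw [this]
      simp
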